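-- pv_equiv track=rewrite | github.com/SCANL/ensemble_tagger | ensemble_tagger_implementation/model_classification.py | calculate_normalized_length
-- ===== SOURCE A (Python) =====
-- def calculate_normalized_length(ensemble_input):
--     i = 0
--     for key, value in ensemble_input.items():
--         if i == 0:
--             ensemble_input[key].append(0)
--         elif i > 0 and i < (len(ensemble_input)-1):
--             ensemble_input[key].append(1)
--         else:
--             ensemble_input[key].append(2)
--         i = i + 1
--     return ensemble_input
-- ===== SOURCE B (Python) =====
-- def calculate_normalized_length(ensemble_input):
--     keys = list(ensemble_input)
--     for key in keys[1:-1]: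
--         ensemble_input[key].append(1)
--     if keys:
--         ensemble_input[keys[0]].append(0)
--     if len(keys) > 1:
--         ensemble_input[keys[-1]].append(2)
--     return ensemble_input
-- ===== Notes on version B (the rewrite author's own statement) =====
-- stated objective: alternative
-- what changed: A walks the dict once with a position counter and branches per item on first/middle/last; B drops the counter and branching and instead performs three slice-shaped steps: append 1 over the interior key slice keys[1:-1], then 0 to the first key, then 2 to the last key when there is more than one.
import Mathlib
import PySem

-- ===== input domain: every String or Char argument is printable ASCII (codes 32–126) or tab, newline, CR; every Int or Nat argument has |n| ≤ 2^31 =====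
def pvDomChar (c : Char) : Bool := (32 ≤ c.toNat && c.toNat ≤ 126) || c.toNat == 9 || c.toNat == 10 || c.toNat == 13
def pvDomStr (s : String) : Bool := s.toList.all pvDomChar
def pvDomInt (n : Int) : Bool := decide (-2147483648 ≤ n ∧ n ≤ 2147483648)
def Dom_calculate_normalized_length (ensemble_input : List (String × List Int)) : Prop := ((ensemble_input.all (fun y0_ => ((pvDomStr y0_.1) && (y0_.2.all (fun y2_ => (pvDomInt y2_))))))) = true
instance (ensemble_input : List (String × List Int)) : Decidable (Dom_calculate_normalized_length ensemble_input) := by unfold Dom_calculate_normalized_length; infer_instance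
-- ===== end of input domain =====

-- B replaces A's single positionally-branching counter loop by three slice-shaped steps (interior 1s,
-- then 0 to the first key, then 2 to the last key when there is more than one); a different
-- decomposition of the same task, same cost. Both Pythons mutate the argument dict in place and
-- return it; the equivalence proved here is about the returned value (the ports are pure).

-- shared helper: transliteration of Python's `ensemble_input[key].append(x)` on a dict encoded as an
-- association list: the value list of the first (unique) entry with that key gets x appended.
def pyAppendAt : List (String × List Int) → String → Int → List (String × List Int)
  | [], _, _ => []
  | (k, v) :: rest, key, x =>
    if k == key then (k, v ++ [x]) :: rest else (k, v) :: pyAppendAt rest key x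

-- ===== PORT A =====
def calculate_normalized_length (ensemble_input : List (String × List Int)) : List (String × List Int) :=
  let n : Int := ensemble_input.length
  (ensemble_input.foldl
    (fun st kv =>
      if st.2 = 0 then (pyAppendAt st.1 kv.1 0, st.2 + 1)
      else if 0 < st.2 ∧ st.2 < n - 1 then (pyAppendAt st.1 kv.1 1, st.2 + 1)
      else (pyAppendAt st.1 kv.1 2, st.2 + 1))
    (ensemble_input, (0 : Int))).1

-- ===== PORT B =====
-- `keys[-1]` is ported as `.getLast` on the (nonempty) cons branch, which is exact there.
def calculate_normalized_length_alt (ensemble_input : List (String × List Int)) : List (String × List Int) :=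
  let keys := ensemble_input.map Prod.fst
  let d1 := (PySem.List.slice keys (some 1) (some (-1))).foldl
    (fun a k => pyAppendAt a k 1) ensemble_input
  match keys with
  | [] => d1
  | k0 :: tl =>
    let d2 := pyAppendAt d1 k0 0
    if 1 < keys.length then pyAppendAt d2 ((k0 :: tl).getLast (List.cons_ne_nil k0 tl)) 2 else d2

-- ===== PRECONDITION & SPEC =====
-- Pre_ restricts to association lists with pairwise-distinct keys: the Python argument is a dict,
-- whose keys are necessarily distinct, so a list with duplicate keys encodes no Python input of A.
def Pre_calculate_normalized_length (ensemble_input : List (String × List Int)) : Prop :=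
  (ensemble_input.map Prod.fst).Nodup
instance (ensemble_input : List (String × List Int)) : Decidable (Pre_calculate_normalized_length ensemble_input) := by unfold Pre_calculate_normalized_length; infer_instance

def pvWitness_calculate_normalized_length : (List (String × List Int)) := [("a", [1]), ("b", [2, 3]), ("c", [])]

def Spec_calculate_normalized_length (ensemble_input : List (String × List Int)) (out : List (String × List Int)) : Prop := out = calculate_normalized_length_alt ensemble_input
instance (ensemble_input : List (String × List Int)) (out : List (String × List Int)) : Decidable (Spec_calculate_normalized_length ensemble_input out) := by unfold Spec_calculate_normalized_length; infer_instance

-- ===== CLAIM (what is proved, stated in full; the proofs are below) =====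
def Claim_equal_calculate_normalized_length : Prop := ∀ (ensemble_input : List (String × List Int)), Dom_calculate_normalized_length ensemble_input → Pre_calculate_normalized_length ensemble_input → Spec_calculate_normalized_length ensemble_input (calculate_normalized_length ensemble_input)

-- ===== LEMMAS AND PROOFS =====

-- positional form of pyAppendAt: append x to the value at position i
def appendIdx : List (String × List Int) → Nat → Int → List (String × List Int)
  | [], _, _ => []
  | (k, v) :: rest, 0, x => (k, v ++ [x]) :: rest
  | kv :: rest, i+1, x => kv :: appendIdx rest i x

-- the marker A attaches at position i of a dict with n entries
def mark (i n : Nat) : Int := if i = 0 then 0 else if i + 1 < n then 1 else 2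

theorem keys_appendIdx (a : List (String × List Int)) (i : Nat) (x : Int) :
    (appendIdx a i x).map Prod.fst = a.map Prod.fst := by
  induction a generalizing i with
  | nil => rfl
  | cons kv rest ih =>
    obtain ⟨k0, v0⟩ := kv
    cases i with
    | zero => simp [appendIdx]
    | succ j => simp [appendIdx, ih]

theorem pyAppendAt_eq_appendIdx (a : List (String × List Int)) (i : Nat) (k : String) (x : Int)
    (hnd : (a.map Prod.fst).Nodup) (hk : (a.map Prod.fst)[i]? = some k) :
    pyAppendAt a k x = appendIdx a i x := by
  induction a generalizing i with
  | nil => simp at hk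
  | cons kv rest ih =>
    obtain ⟨k0, v0⟩ := kv
    cases i with
    | zero =>
      simp at hk
      subst hk
      simp [pyAppendAt, appendIdx]
    | succ i =>
      simp only [List.map_cons, List.getElem?_cons_succ] at hk
      have hmem : k ∈ rest.map Prod.fst := List.mem_of_getElem? hk
      simp only [List.map_cons, List.nodup_cons] at hnd
      have hne : (k0 == k) = false := by
        refine beq_eq_false_iff_ne.mpr ?_
        intro h; exact hnd.1 (h ▸ hmem)
      simp [pyAppendAt, appendIdx, hne, ih i hnd.2 hk]

theorem keys_foldl_appendIdx (is : List Nat) (acc : List (String × List Int)) (c : Int) :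
    (is.foldl (fun a i => appendIdx a i c) acc).map Prod.fst = acc.map Prod.fst := by
  induction is generalizing acc with
  | nil => rfl
  | cons i t ih => simp [List.foldl_cons, ih, keys_appendIdx]

theorem appendIdx_zero_succ_comm (a : List (String × List Int)) (j : Nat) (x y : Int) :
    appendIdx (appendIdx a 0 x) (j+1) y = appendIdx (appendIdx a (j+1) y) 0 x := by
  cases a with
  | nil => rfl
  | cons kv rest => obtain ⟨k0, v0⟩ := kv; rfl

theorem foldl_appendIdx_zero_comm (is : List Nat) (acc : List (String × List Int)) (x : Int)
    (hpos : ∀ i ∈ is, 0 < i) :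
    is.foldl (fun a i => appendIdx a i 1) (appendIdx acc 0 x)
      = appendIdx (is.foldl (fun a i => appendIdx a i 1) acc) 0 x := by
  induction is generalizing acc with
  | nil => rfl
  | cons i t ih =>
    obtain ⟨j, rfl⟩ : ∃ j, i = j + 1 := ⟨i - 1, by have := hpos i (by simp); omega⟩
    simp only [List.foldl_cons]
    rw [appendIdx_zero_succ_comm, ih _ (fun i h => hpos i (by simp [h]))]

theorem forall2_range'_drop_take (ks : List String) (mlen : Nat) :
    ∀ (j : Nat), j + mlen ≤ ks.length →
      List.Forall₂ (fun i k => ks[i]? = some k) (List.range' j mlen) ((ks.drop j).take mlen) := by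
  induction mlen with
  | zero => intro j _; simp
  | succ m ih =>
    intro j h
    have hj : j < ks.length := by omega
    rw [List.drop_eq_getElem_cons hj]
    have hr : List.range' j (m+1) = j :: List.range' (j+1) m := rfl
    rw [hr, List.take_succ_cons]
    exact List.Forall₂.cons (List.getElem?_eq_getElem hj) (ih (j+1) (by omega))

-- fold of pyAppendAt over a list of keys = fold of appendIdx over their positions (constant marker)
theorem foldl_pyAppendAt_eq (keys0 : List String) (hnd : keys0.Nodup) (c : Int)
    (is : List Nat) (ms : List String) :
    ∀ (acc : List (String × List Int)), acc.map Prod.fst = keys0 →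
      List.Forall₂ (fun i k => keys0[i]? = some k) is ms →
      ms.foldl (fun a k => pyAppendAt a k c) acc = is.foldl (fun a i => appendIdx a i c) acc := by
  intro acc hkeys hf
  induction hf generalizing acc with
  | nil => rfl
  | @cons i k is' ms' hik _ ih =>
    simp only [List.foldl_cons]
    rw [pyAppendAt_eq_appendIdx acc i k c (hkeys ▸ hnd) (by rw [hkeys]; exact hik)]
    exact ih _ (by rw [keys_appendIdx, hkeys])

-- A's stateful counter loop over keys = fold of appendIdx over positions, marker read at the counter
theorem foldl_state_eq (keys0 : List String) (hnd : keys0.Nodup) (m : Int → Int)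
    (ms : List String) :
    ∀ (j : Nat) (acc : List (String × List Int)), acc.map Prod.fst = keys0 →
      List.Forall₂ (fun i k => keys0[i]? = some k) (List.range' j ms.length) ms →
      (ms.foldl (fun st k => (pyAppendAt st.1 k (m st.2), st.2 + 1)) (acc, (j : Int))).1
        = (List.range' j ms.length).foldl (fun a i => appendIdx a i (m (i : Int))) acc := by
  induction ms with
  | nil => intro j acc _ _; rfl
  | cons k t ih =>
    intro j acc hkeys hf
    simp only [List.length_cons] at hf ⊢
    have hrange : List.range' j (t.length + 1) = j :: List.range' (j+1) t.length := rfl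
    rw [hrange] at hf ⊢
    rcases hf with _ | ⟨hjk, hf⟩
    simp only [List.foldl_cons]
    rw [pyAppendAt_eq_appendIdx acc j k (m (j : Int)) (hkeys ▸ hnd) (by rw [hkeys]; exact hjk)]
    have hcast : (j : Int) + 1 = ((j + 1 : Nat) : Int) := by push_cast; ring
    rw [hcast]
    exact ih (j+1) _ (by rw [keys_appendIdx, hkeys]) hf

theorem slice_one_negone (xs : List String) :
    PySem.List.slice xs (some 1) (some (-1)) = (xs.drop 1).take (xs.length - 2) := by
  simp [PySem.List.slice, PySem.List.clampIdx]
  rcases xs with _ | ⟨a, t⟩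
  · simp
  · have h2 : ((((a :: t).length : Int)) + -1).toNat = (a :: t).length - 1 := by simp
    rw [if_neg (by simp : ¬(a :: t = [])), h2]
    simp

-- A's pair loop = the same loop over the key list
theorem stepPairs (nI : Int) (l : List (String × List Int)) :
    ∀ (acc : List (String × List Int) × Int),
      l.foldl (fun st kv =>
        if st.2 = 0 then (pyAppendAt st.1 kv.1 0, st.2 + 1)
        else if 0 < st.2 ∧ st.2 < nI - 1 then (pyAppendAt st.1 kv.1 1, st.2 + 1)
        else (pyAppendAt st.1 kv.1 2, st.2 + 1)) acc
      = (l.map Prod.fst).foldl (fun st k =>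
          (pyAppendAt st.1 k (if st.2 = 0 then 0 else if 0 < st.2 ∧ st.2 < nI - 1 then 1 else 2),
            st.2 + 1)) acc := by
  induction l with
  | nil => intro acc; rfl
  | cons p t ih =>
    intro acc
    simp only [List.map_cons, List.foldl_cons, ih]
    congr 1
    split_ifs <;> rfl

-- characterisation of port A: append mark i n at every position i
theorem A_char (d : List (String × List Int)) (hnd : (d.map Prod.fst).Nodup) :
    calculate_normalized_length d
      = (List.range' 0 d.length).foldl (fun a i => appendIdx a i (mark i d.length)) d := by
  show (d.foldl _ (d, (0 : Int))).1 = _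
  rw [stepPairs (d.length : Int) d (d, (0 : Int))]
  have hfa := forall2_range'_drop_take (d.map Prod.fst) (d.map Prod.fst).length 0 (by omega)
  simp only [List.drop_zero, List.take_length] at hfa
  have hst := foldl_state_eq (d.map Prod.fst) hnd
      (fun z => if z = 0 then 0 else if 0 < z ∧ z < (d.length : Int) - 1 then 1 else 2)
      (d.map Prod.fst) 0 d (by simp) hfa
  simp only [Nat.cast_zero] at hst
  rw [hst]
  simp only [List.length_map]
  refine PySem.List.foldl_congr_mem _ _ _ _ (fun a i hi => ?_)
  have hi' : 0 ≤ i ∧ i < 0 + d.length := List.mem_range'_1.mp hi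
  congr 1
  simp only [mark]
  by_cases hz : i = 0
  · subst hz; simp
  · rw [if_neg (by exact_mod_cast hz), if_neg hz]
    by_cases h1 : i + 1 < d.length
    · rw [if_pos (⟨by exact_mod_cast Nat.pos_of_ne_zero hz, by omega⟩ :
        (0:Int) < (i:Int) ∧ (i:Int) < (d.length : Int) - 1), if_pos h1]
    · rw [if_neg (by omega), if_neg h1]

-- characterisation of port B: the same positional folds
theorem B_char (d : List (String × List Int)) (hnd : (d.map Prod.fst).Nodup) :
    calculate_normalized_length_alt d
      = (List.range' 0 d.length).foldl (fun a i => appendIdx a i (mark i d.length)) d := by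
  cases d with
  | nil => rfl
  | cons kv0 rest =>
  obtain ⟨k0, v0⟩ := kv0
  have hkd : ((k0, v0) :: rest).map Prod.fst = k0 :: rest.map Prod.fst := rfl
  have hBL : calculate_normalized_length_alt ((k0, v0) :: rest)
      = (if 1 < (k0 :: rest.map Prod.fst).length
          then pyAppendAt
            (pyAppendAt ((PySem.List.slice (k0 :: rest.map Prod.fst) (some 1) (some (-1))).foldl
                (fun a k => pyAppendAt a k 1) ((k0, v0) :: rest)) k0 0)
            ((k0 :: rest.map Prod.fst).getLast (List.cons_ne_nil k0 (rest.map Prod.fst))) 2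
          else pyAppendAt ((PySem.List.slice (k0 :: rest.map Prod.fst) (some 1) (some (-1))).foldl
                (fun a k => pyAppendAt a k 1) ((k0, v0) :: rest)) k0 0) := rfl
  rw [hBL]
  have hnd' : (k0 :: rest.map Prod.fst).Nodup := hkd ▸ hnd
  have hslice : PySem.List.slice (k0 :: rest.map Prod.fst) (some 1) (some (-1))
      = ((k0 :: rest.map Prod.fst).drop 1).take (rest.length - 1) := by
    rw [slice_one_negone]
    congr 1
    simp
  have hF : ((PySem.List.slice (k0 :: rest.map Prod.fst) (some 1) (some (-1))).foldl
        (fun a k => pyAppendAt a k 1) ((k0, v0) :: rest))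
      = (List.range' 1 (rest.length - 1)).foldl (fun a i => appendIdx a i 1) ((k0, v0) :: rest) := by
    rw [hslice]
    exact foldl_pyAppendAt_eq (k0 :: rest.map Prod.fst) hnd' 1 _ _ ((k0, v0) :: rest) hkd
      (forall2_range'_drop_take (k0 :: rest.map Prod.fst) (rest.length - 1) 1 (by simp; omega))
  rw [hF]
  have hmidkeys : ((List.range' 1 (rest.length - 1)).foldl (fun a i => appendIdx a i 1)
        ((k0, v0) :: rest)).map Prod.fst = k0 :: rest.map Prod.fst := by
    rw [keys_foldl_appendIdx]
    exact hkd
  have hB2 : pyAppendAt ((List.range' 1 (rest.length - 1)).foldl (fun a i => appendIdx a i 1)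
        ((k0, v0) :: rest)) k0 0
      = appendIdx ((List.range' 1 (rest.length - 1)).foldl (fun a i => appendIdx a i 1)
        ((k0, v0) :: rest)) 0 0 := by
    refine pyAppendAt_eq_appendIdx _ 0 k0 0 (hmidkeys ▸ hnd') ?_
    rw [hmidkeys]; rfl
  rw [hB2]
  rcases Nat.eq_zero_or_pos rest.length with hr | hr
  · -- singleton dict: only the first-key step fires
    have hrest : rest = [] := List.length_eq_zero_iff.mp hr
    subst hrest
    simp only [List.map_nil, List.length_cons, List.length_nil]
    rw [if_neg (by omega)]
    simp [appendIdx, mark, List.range']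
  · -- at least two keys
    rw [if_pos (by simp only [List.length_cons, List.length_map]; omega)]
    have hlast : (k0 :: rest.map Prod.fst)[rest.length]?
        = some ((k0 :: rest.map Prod.fst).getLast (List.cons_ne_nil k0 (rest.map Prod.fst))) := by
      have h1 : (k0 :: rest.map Prod.fst).length - 1 = rest.length := by simp
      rw [← h1, ← List.getLast?_eq_getElem?,
        List.getLast?_eq_some_getLast (List.cons_ne_nil k0 (rest.map Prod.fst))]
    have hB3 : pyAppendAt (appendIdx ((List.range' 1 (rest.length - 1)).foldl
          (fun a i => appendIdx a i 1) ((k0, v0) :: rest)) 0 0)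
          ((k0 :: rest.map Prod.fst).getLast (List.cons_ne_nil k0 (rest.map Prod.fst))) 2
        = appendIdx (appendIdx ((List.range' 1 (rest.length - 1)).foldl
          (fun a i => appendIdx a i 1) ((k0, v0) :: rest)) 0 0) rest.length 2 := by
      refine pyAppendAt_eq_appendIdx _ rest.length _ 2 ?_ ?_
      · rw [keys_appendIdx, hmidkeys]; exact hnd'
      · rw [keys_appendIdx, hmidkeys]; exact hlast
    rw [hB3]
    -- now massage the range fold on the right
    have hsplit : List.range' 0 ((k0, v0) :: rest).length
        = 0 :: (List.range' 1 (rest.length - 1) ++ [rest.length]) := by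
      simp only [List.length_cons]
      have e1 : List.range' 0 (rest.length + 1) = 0 :: List.range' 1 rest.length := rfl
      rw [e1]
      congr 1
      have e2 : rest.length = (rest.length - 1) + 1 := by omega
      have e3 : 1 + (rest.length - 1) = rest.length := by omega
      conv_lhs => rw [e2]
      rw [List.range'_1_concat, e3]
    rw [hsplit]
    simp only [List.foldl_cons, List.foldl_append, List.foldl_nil]
    have hm0 : mark 0 ((k0, v0) :: rest).length = 0 := by simp [mark]
    have hmlast : mark rest.length ((k0, v0) :: rest).length = 2 := by
      simp only [mark, List.length_cons]
      rw [if_neg (by omega), if_neg (by omega)]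
    have hmmid : (List.range' 1 (rest.length - 1)).foldl
          (fun a i => appendIdx a i (mark i ((k0, v0) :: rest).length))
          (appendIdx ((k0, v0) :: rest) 0 (mark 0 ((k0, v0) :: rest).length))
        = (List.range' 1 (rest.length - 1)).foldl (fun a i => appendIdx a i 1)
          (appendIdx ((k0, v0) :: rest) 0 0) := by
      rw [hm0]
      refine PySem.List.foldl_congr_mem _ _ _ _ (fun a i hi => ?_)
      have hi' := List.mem_range'_1.mp hi
      have : mark i ((k0, v0) :: rest).length = 1 := by
        simp only [mark, List.length_cons]
        rw [if_neg (by omega), if_pos (by omega)]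
      rw [this]
    rw [hmmid, hmlast,
      foldl_appendIdx_zero_comm _ _ 0 (fun i hi => by have := List.mem_range'_1.mp hi; omega)]

theorem ports_agree (d : List (String × List Int)) (hnd : (d.map Prod.fst).Nodup) :
    calculate_normalized_length d = calculate_normalized_length_alt d := by
  rw [A_char d hnd, B_char d hnd]

-- ===== VERDICT (by name: the statement is the Claim_ definition above) =====
theorem calculate_normalized_length_spec : Claim_equal_calculate_normalized_length := by
  intro d _ hpre
  unfold Spec_calculate_normalized_length
  exact ports_agree d hpre
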